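-- pv_equiv track=rewrite | github.com/FulberRenika/BinaryBrains | vibeathon/BACKEND/app.py | classify_emergency
-- ===== SOURCE A (Python) =====
-- def classify_emergency(text: str):
--     t = text.lower()
--
--     departments = set()
--
--     fire_kw = ["fire", "smoke", "burn", "burning", "gas leak", "explosion"]
--     amb_kw  = ["accident", "injury", "blood", "bleeding", "unconscious", "faint", "breathing", "heart", "stroke"]
--     pol_kw  = ["theft", "robbery", "attack", "fight", "threat", "weapon", "knife", "gun", "harassment"]
--
--     if any(k in t for k in fire_kw):
--         departments.add("Fire Station")
--     if any(k in t for k in amb_kw):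
--         departments.add("Ambulance")
--     if any(k in t for k in pol_kw):
--         departments.add("Police")
--
--     if not departments:
--         # fallback: if unclear, send Police (common emergency intake)
--         departments.add("Police")
--
--     # Severity
--     critical_kw = ["not breathing", "unconscious", "explosion", "severe bleeding", "big fire", "collapsed"]
--     high_kw     = ["fire", "accident", "weapon", "knife", "gun", "gas leak"]
--     medium_kw   = ["bleeding", "injury", "theft", "fight"]
--     low_kw      = ["noise", "lost", "minor", "small"]
--
--     if any(k in t for k in critical_kw):
--         severity = "Critical"
--     elif any(k in t for k in high_kw):
--         severity = "High"
--     elif any(k in t for k in medium_kw):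
--         severity = "Medium"
--     elif any(k in t for k in low_kw):
--         severity = "Low"
--     else:
--         severity = "Medium"
--
--     return sorted(list(departments)), severity
-- ===== SOURCE B (Python) =====
-- # Position-major scan: walk the lowered text once, left to right, and at every position
-- # prefix-match the keywords of a keyword->department and a keyword->severity-rank table
-- # (a naive multi-pattern matcher), instead of one substring test per keyword.
-- _DEPT = {
--     "fire": "Fire Station", "smoke": "Fire Station", "burn": "Fire Station",
--     "burning": "Fire Station", "gas leak": "Fire Station", "explosion": "Fire Station",
--     "accident": "Ambulance", "injury": "Ambulance", "blood": "Ambulance",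
--     "bleeding": "Ambulance", "unconscious": "Ambulance", "faint": "Ambulance",
--     "breathing": "Ambulance", "heart": "Ambulance", "stroke": "Ambulance",
--     "theft": "Police", "robbery": "Police", "attack": "Police",
--     "fight": "Police", "threat": "Police", "weapon": "Police",
--     "knife": "Police", "gun": "Police", "harassment": "Police",
-- }
-- _SEV = {
--     "not breathing": 4, "unconscious": 4, "explosion": 4,
--     "severe bleeding": 4, "big fire": 4, "collapsed": 4,
--     "fire": 3, "accident": 3, "weapon": 3, "knife": 3, "gun": 3, "gas leak": 3,
--     "bleeding": 2, "injury": 2, "theft": 2, "fight": 2,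
--     "noise": 1, "lost": 1, "minor": 1, "small": 1,
-- }
-- _NAMES = ["Medium", "Low", "Medium", "High", "Critical"]
--
--
-- def classify_emergency(text: str):
--     t = text.lower()
--     depts = set()
--     rank = 0
--     for i in range(len(t)):
--         for k, d in _DEPT.items():
--             if t.startswith(k, i):
--                 depts.add(d)
--         for k, r in _SEV.items():
--             if rank < r and t.startswith(k, i):
--                 rank = r
--     return sorted(depts) if depts else ["Police"], _NAMES[rank]
-- ===== Notes on version B (the rewrite author's own statement) =====
-- stated objective: alternative
-- what changed: Replaces A's keyword-major search (one 'k in t' substring test per keyword plus an elif severity chain) by a position-major naive multi-pattern matcher: a single left-to-right scan of the lowered text that at each position prefix-matches a keyword-to-department and a keyword-to-severity-rank table, accumulating a department set and a running maximum rank that is mapped back to a severity name at the end.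
import Mathlib
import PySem

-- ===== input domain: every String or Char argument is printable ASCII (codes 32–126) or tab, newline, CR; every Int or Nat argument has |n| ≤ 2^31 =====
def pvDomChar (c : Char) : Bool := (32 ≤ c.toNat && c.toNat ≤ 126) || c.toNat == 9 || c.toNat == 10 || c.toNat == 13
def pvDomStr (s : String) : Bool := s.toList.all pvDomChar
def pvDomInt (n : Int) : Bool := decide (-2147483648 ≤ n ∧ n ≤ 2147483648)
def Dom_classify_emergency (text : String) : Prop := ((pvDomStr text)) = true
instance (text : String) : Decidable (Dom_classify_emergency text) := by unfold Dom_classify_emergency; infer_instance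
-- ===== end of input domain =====

-- B replaces A's keyword-major substring tests (one 'k in t' per keyword plus an elif chain)
-- by a position-major scan: one left-to-right walk of the lowered text, prefix-matching a
-- keyword→department and a keyword→severity-rank table at each position.

-- ===== PORT A =====
def classify_emergency (text : String) : List String × String :=
  let t := PySem.Str.lower text
  let departments : PySem.Set String := PySem.Set.empty
  let fire_kw : List String := ["fire", "smoke", "burn", "burning", "gas leak", "explosion"]
  let amb_kw : List String := ["accident", "injury", "blood", "bleeding", "unconscious", "faint", "breathing", "heart", "stroke"]
  let pol_kw : List String := ["theft", "robbery", "attack", "fight", "threat", "weapon", "knife", "gun", "harassment"]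
  let departments := if fire_kw.any (fun k => PySem.Str.isIn k t) then PySem.Set.add departments "Fire Station" else departments
  let departments := if amb_kw.any (fun k => PySem.Str.isIn k t) then PySem.Set.add departments "Ambulance" else departments
  let departments := if pol_kw.any (fun k => PySem.Str.isIn k t) then PySem.Set.add departments "Police" else departments
  let departments := if departments = [] then PySem.Set.add departments "Police" else departments
  let critical_kw : List String := ["not breathing", "unconscious", "explosion", "severe bleeding", "big fire", "collapsed"]
  let high_kw : List String := ["fire", "accident", "weapon", "knife", "gun", "gas leak"]
  let medium_kw : List String := ["bleeding", "injury", "theft", "fight"]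
  let low_kw : List String := ["noise", "lost", "minor", "small"]
  let severity :=
    if critical_kw.any (fun k => PySem.Str.isIn k t) then "Critical"
    else if high_kw.any (fun k => PySem.Str.isIn k t) then "High"
    else if medium_kw.any (fun k => PySem.Str.isIn k t) then "Medium"
    else if low_kw.any (fun k => PySem.Str.isIn k t) then "Low"
    else "Medium"
  (PySem.List.sorted departments (fun x => x) false, severity)

-- ===== PORT B =====
def pvDeptTable : List (String × String) := [
  ("fire", "Fire Station"), ("smoke", "Fire Station"), ("burn", "Fire Station"),
  ("burning", "Fire Station"), ("gas leak", "Fire Station"), ("explosion", "Fire Station"),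
  ("accident", "Ambulance"), ("injury", "Ambulance"), ("blood", "Ambulance"),
  ("bleeding", "Ambulance"), ("unconscious", "Ambulance"), ("faint", "Ambulance"),
  ("breathing", "Ambulance"), ("heart", "Ambulance"), ("stroke", "Ambulance"),
  ("theft", "Police"), ("robbery", "Police"), ("attack", "Police"),
  ("fight", "Police"), ("threat", "Police"), ("weapon", "Police"),
  ("knife", "Police"), ("gun", "Police"), ("harassment", "Police")]

def pvSevTable : List (String × Int) := [
  ("not breathing", 4), ("unconscious", 4), ("explosion", 4),
  ("severe bleeding", 4), ("big fire", 4), ("collapsed", 4),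
  ("fire", 3), ("accident", 3), ("weapon", 3), ("knife", 3), ("gun", 3), ("gas leak", 3),
  ("bleeding", 2), ("injury", 2), ("theft", 2), ("fight", 2),
  ("noise", 1), ("lost", 1), ("minor", 1), ("small", 1)]

def pvSevNames : List String := ["Medium", "Low", "Medium", "High", "Critical"]

-- the 'for i in range(len(t))' loop of Source B: one step per position = per suffix of the text
def pvScan : List Char → PySem.Set String → Int → PySem.Set String × Int
  | [], depts, rank => (depts, rank)
  | c :: rest, depts, rank =>
      let depts := pvDeptTable.foldl
        (fun s p => if PySem.Chars.startswith (c :: rest) p.1.toList then PySem.Set.add s p.2 else s) depts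
      let rank := pvSevTable.foldl
        (fun r p => if decide (r < p.2) && PySem.Chars.startswith (c :: rest) p.1.toList then p.2 else r) rank
      pvScan rest depts rank

def classify_emergency_alt (text : String) : List String × String :=
  let t := (PySem.Str.lower text).toList
  let res := pvScan t PySem.Set.empty 0
  ((if res.1 = [] then ["Police"] else PySem.List.sorted res.1 (fun x => x) false),
   PySem.List.pyGetD pvSevNames res.2 "")

-- ===== PRECONDITION & SPEC =====
def Spec_classify_emergency (text : String) (out : List String × String) : Prop := out = classify_emergency_alt text
instance (text : String) (out : List String × String) : Decidable (Spec_classify_emergency text out) := by unfold Spec_classify_emergency; infer_instance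

-- ===== CLAIM (what is proved, stated in full; the proofs are below) =====
def Claim_equal_classify_emergency : Prop := ∀ (text : String), Dom_classify_emergency text → Spec_classify_emergency text (classify_emergency text)

-- ===== LEMMAS AND PROOFS =====

-- 'k in (c :: rest)' splits into a prefix match at the head position plus 'k in rest'
theorem isIn_cons (k : List Char) (c : Char) (rest : List Char) :
    PySem.Chars.isIn k (c :: rest) = (PySem.Chars.startswith (c :: rest) k || PySem.Chars.isIn k rest) := by
  rw [Bool.eq_iff_iff]
  simp only [Bool.or_eq_true, PySem.Chars.isIn_iff_infix, PySem.Chars.startswith_iff]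
  exact List.infix_cons_iff

theorem mem_foldl_condAdd (T : List (String × String)) (cond : String → Bool)
    (s : PySem.Set String) (y : String) :
    (y ∈ T.foldl (fun s p => if cond p.1 then PySem.Set.add s p.2 else s) s) ↔
      y ∈ s ∨ ∃ p ∈ T, cond p.1 = true ∧ y = p.2 := by
  induction T generalizing s with
  | nil => simp
  | cons p ps ih =>
    simp only [List.foldl_cons]
    rw [ih]
    by_cases h : cond p.1 = true
    · simp only [h, if_true, PySem.Set.mem_add]
      constructor
      · rintro ((hy | hy) | ⟨q, hq, hc, hy⟩)
        · exact Or.inl hy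
        · exact Or.inr ⟨p, List.mem_cons_self .., h, hy⟩
        · exact Or.inr ⟨q, List.mem_cons_of_mem _ hq, hc, hy⟩
      · rintro (hy | ⟨q, hq, hc, hy⟩)
        · exact Or.inl (Or.inl hy)
        · rcases List.mem_cons.mp hq with rfl | hq2
          · exact Or.inl (Or.inr hy)
          · exact Or.inr ⟨q, hq2, hc, hy⟩
    · rw [Bool.not_eq_true] at h
      simp only [h, Bool.false_eq_true, if_false]
      constructor
      · rintro (hy | ⟨q, hq, hc, hy⟩)
        · exact Or.inl hy
        · exact Or.inr ⟨q, List.mem_cons_of_mem _ hq, hc, hy⟩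
      · rintro (hy | ⟨q, hq, hc, hy⟩)
        · exact Or.inl hy
        · rcases List.mem_cons.mp hq with rfl | hq2
          · rw [h] at hc; cases hc
          · exact Or.inr ⟨q, hq2, hc, hy⟩

theorem nodup_foldl_condAdd (T : List (String × String)) (cond : String → Bool)
    (s : PySem.Set String) (hs : s.Nodup) :
    (T.foldl (fun s p => if cond p.1 then PySem.Set.add s p.2 else s) s).Nodup := by
  induction T generalizing s with
  | nil => exact hs
  | cons p ps ih =>
    simp only [List.foldl_cons]
    by_cases h : cond p.1 = true
    · simp only [h, if_true]; exact ih _ (PySem.Set.nodup_add _ _ hs)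
    · rw [Bool.not_eq_true] at h; simp only [h, Bool.false_eq_true, if_false]; exact ih _ hs

theorem pvScan_fst_nodup (cs : List Char) (s : PySem.Set String) (r : Int) (hs : s.Nodup) :
    (pvScan cs s r).1.Nodup := by
  induction cs generalizing s r with
  | nil => exact hs
  | cons c rest ih =>
    simp only [pvScan]
    exact ih _ _ (nodup_foldl_condAdd pvDeptTable (fun k => PySem.Chars.startswith (c :: rest) k.toList) s hs)

theorem pvScan_fst_mem (cs : List Char) (s : PySem.Set String) (r : Int) (y : String) :
    (y ∈ (pvScan cs s r).1) ↔
      y ∈ s ∨ ∃ p ∈ pvDeptTable, PySem.Chars.isIn p.1.toList cs = true ∧ y = p.2 := by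
  induction cs generalizing s r with
  | nil =>
    have hnone : ∀ p ∈ pvDeptTable, PySem.Chars.isIn p.1.toList [] = false := by decide
    simp only [pvScan]
    constructor
    · exact Or.inl
    · rintro (h | ⟨p, hp, hin, _⟩)
      · exact h
      · rw [hnone p hp] at hin; cases hin
  | cons c rest ih =>
    simp only [pvScan]
    rw [ih, mem_foldl_condAdd pvDeptTable (fun k => PySem.Chars.startswith (c :: rest) k.toList) s y]
    constructor
    · rintro ((h | ⟨p, hp, hsw, hy⟩) | ⟨p, hp, hin, hy⟩)
      · exact Or.inl h
      · exact Or.inr ⟨p, hp, by rw [isIn_cons, hsw]; rfl, hy⟩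
      · exact Or.inr ⟨p, hp, by rw [isIn_cons, hin, Bool.or_true], hy⟩
    · rintro (h | ⟨p, hp, hin, hy⟩)
      · exact Or.inl (Or.inl h)
      · rw [isIn_cons, Bool.or_eq_true] at hin
        rcases hin with hsw | hin
        · exact Or.inl (Or.inr ⟨p, hp, hsw, hy⟩)
        · exact Or.inr ⟨p, hp, hin, hy⟩

-- max-fold lemmas for the severity rank
theorem foldl_max_if_max (L : List (String × Int)) (c : String → Bool) (a b : Int) :
    L.foldl (fun m p => if c p.1 then max m p.2 else m) (max a b) =
      max a (L.foldl (fun m p => if c p.1 then max m p.2 else m) b) := by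
  induction L generalizing b with
  | nil => rfl
  | cons p ps ih =>
    simp only [List.foldl_cons]
    by_cases h : c p.1 = true
    · simp only [h, if_true, max_assoc, ih]
    · rw [Bool.not_eq_true] at h; simp only [h, Bool.false_eq_true, if_false, ih]

theorem foldl_max_if_or (L : List (String × Int)) (c1 c2 : String → Bool) (r : Int) :
    L.foldl (fun m p => if c2 p.1 then max m p.2 else m)
      (L.foldl (fun m p => if c1 p.1 then max m p.2 else m) r) =
    L.foldl (fun m p => if c1 p.1 || c2 p.1 then max m p.2 else m) r := by
  induction L generalizing r with
  | nil => rfl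
  | cons p ps ih =>
    simp only [List.foldl_cons]
    have hcomm : ∀ X : Int,
        (if c2 p.1 then max (ps.foldl (fun m p => if c1 p.1 then max m p.2 else m) X) p.2
         else ps.foldl (fun m p => if c1 p.1 then max m p.2 else m) X) =
        ps.foldl (fun m p => if c1 p.1 then max m p.2 else m)
          (if c2 p.1 then max X p.2 else X) := by
      intro X
      by_cases h : c2 p.1 = true
      · simp only [h, if_true]
        rw [max_comm X p.2, foldl_max_if_max, max_comm]
      · rw [Bool.not_eq_true] at h; simp only [h, Bool.false_eq_true, if_false]
    rw [hcomm, ih]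
    congr 1
    by_cases h1 : c1 p.1 = true <;> by_cases h2 : c2 p.1 = true <;>
      simp [h1, h2]

theorem foldl_max_if_false (L : List (String × Int)) (c : String → Bool) (r : Int)
    (h : ∀ p ∈ L, c p.1 = false) :
    L.foldl (fun m p => if c p.1 then max m p.2 else m) r = r := by
  induction L generalizing r with
  | nil => rfl
  | cons p ps ih =>
    simp only [List.foldl_cons, h p (List.mem_cons_self ..), Bool.false_eq_true, if_false]
    exact ih _ (fun q hq => h q (List.mem_cons_of_mem _ hq))

theorem pvScan_snd (cs : List Char) (s : PySem.Set String) (r : Int) :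
    (pvScan cs s r).2 =
      pvSevTable.foldl (fun m p => if PySem.Chars.isIn p.1.toList cs then max m p.2 else m) r := by
  induction cs generalizing s r with
  | nil =>
    simp only [pvScan]
    exact (foldl_max_if_false pvSevTable (fun k => PySem.Chars.isIn k.toList []) r (by decide)).symm
  | cons c rest ih =>
    simp only [pvScan]
    rw [show (fun (r : Int) (p : String × Int) =>
          if decide (r < p.2) && PySem.Chars.startswith (c :: rest) p.1.toList then p.2 else r)
        = (fun (m : Int) (p : String × Int) =>
          if PySem.Chars.startswith (c :: rest) p.1.toList then max m p.2 else m) from by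
      funext m p
      by_cases hsw : PySem.Chars.startswith (c :: rest) p.1.toList = true <;>
        by_cases hlt : m < p.2 <;> simp [hsw, hlt] <;> omega]
    rw [ih]
    refine (foldl_max_if_or pvSevTable (fun k => PySem.Chars.startswith (c :: rest) k.toList)
      (fun k => PySem.Chars.isIn k.toList rest) r).trans ?_
    congr 1
    funext m p
    rw [isIn_cons]

-- keyword-major fold over a constant-rank segment collapses to one any() test
theorem seg_max (tl : List Char) (ks : List String) (r : Int) (m : Int) :
    (ks.map (fun k => (k, r))).foldl
        (fun m p => if PySem.Chars.isIn p.1.toList tl then max m p.2 else m) m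
      = if ks.any (fun k => PySem.Chars.isIn k.toList tl) then max m r else m := by
  induction ks generalizing m with
  | nil => simp
  | cons k ks ih =>
    simp only [List.map_cons, List.foldl_cons, List.any_cons]
    by_cases h : PySem.Chars.isIn k.toList tl = true
    · have hm : max (max m r) r = max m r := by rw [max_assoc, max_self]
      simp only [h, if_true, Bool.true_or, ih, hm, ite_self]
    · rw [Bool.not_eq_true] at h
      simp only [h, Bool.false_eq_true, if_false, Bool.false_or]
      exact ih m

-- the elif chain and the rank-to-name lookup agree on all 16 keyword-group outcomes
theorem sev_name_eq (b4 b3 b2 b1 : Bool) :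
    (if b4 = true then "Critical"
     else if b3 = true then "High"
     else if b2 = true then "Medium"
     else if b1 = true then "Low"
     else "Medium")
    = PySem.List.pyGetD pvSevNames
        (if b1 = true
         then max (if b2 = true
                   then max (if b3 = true
                             then max (if b4 = true then max 0 4 else 0) 3
                             else (if b4 = true then max 0 4 else 0)) 2
                   else (if b3 = true
                         then max (if b4 = true then max 0 4 else 0) 3
                         else (if b4 = true then max 0 4 else 0))) 1
         else (if b2 = true
               then max (if b3 = true
                         then max (if b4 = true then max 0 4 else 0) 3
                         else (if b4 = true then max 0 4 else 0)) 2
               else (if b3 = true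
                     then max (if b4 = true then max 0 4 else 0) 3
                     else (if b4 = true then max 0 4 else 0)))) "" := by
  cases b4 <;> cases b3 <;> cases b2 <;> cases b1 <;> rfl

theorem sev_eq (text : String) :
    (classify_emergency text).2 = (classify_emergency_alt text).2 := by
  simp only [classify_emergency, classify_emergency_alt]
  rw [pvScan_snd]
  rw [show pvSevTable
      = (["not breathing", "unconscious", "explosion", "severe bleeding", "big fire", "collapsed"].map
          (fun k => (k, (4 : Int))))
        ++ (["fire", "accident", "weapon", "knife", "gun", "gas leak"].map (fun k => (k, (3 : Int))))
        ++ (["bleeding", "injury", "theft", "fight"].map (fun k => (k, (2 : Int))))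
        ++ (["noise", "lost", "minor", "small"].map (fun k => (k, (1 : Int)))) from rfl]
  simp only [List.foldl_append, seg_max, PySem.Str.isIn_eq]
  exact sev_name_eq _ _ _ _

theorem dept_mem (text : String) (y : String) :
    (y ∈ (pvScan (PySem.Str.lower text).toList PySem.Set.empty 0).1) ↔
      ((List.any ["fire", "smoke", "burn", "burning", "gas leak", "explosion"]
          (fun k => PySem.Chars.isIn k.toList (PySem.Str.lower text).toList)) = true ∧ y = "Fire Station")
      ∨ ((List.any ["accident", "injury", "blood", "bleeding", "unconscious", "faint", "breathing", "heart", "stroke"]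
          (fun k => PySem.Chars.isIn k.toList (PySem.Str.lower text).toList)) = true ∧ y = "Ambulance")
      ∨ ((List.any ["theft", "robbery", "attack", "fight", "threat", "weapon", "knife", "gun", "harassment"]
          (fun k => PySem.Chars.isIn k.toList (PySem.Str.lower text).toList)) = true ∧ y = "Police") := by
  rw [pvScan_fst_mem]
  rw [show pvDeptTable
      = (["fire", "smoke", "burn", "burning", "gas leak", "explosion"].map (fun k => (k, "Fire Station")))
        ++ (["accident", "injury", "blood", "bleeding", "unconscious", "faint", "breathing", "heart", "stroke"].map
            (fun k => (k, "Ambulance")))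
        ++ (["theft", "robbery", "attack", "fight", "threat", "weapon", "knife", "gun", "harassment"].map
            (fun k => (k, "Police"))) from rfl]
  simp only [PySem.Set.empty, List.mem_append, List.mem_map, List.any_eq_true,
    List.not_mem_nil, false_or]
  constructor
  · rintro ⟨p, hp, hin, hy⟩
    rcases hp with (hF | hA) | hP
    · obtain ⟨k, hk, hpe⟩ := hF
      cases hpe
      exact Or.inl ⟨⟨k, hk, hin⟩, hy⟩
    · obtain ⟨k, hk, hpe⟩ := hA
      cases hpe
      exact Or.inr (Or.inl ⟨⟨k, hk, hin⟩, hy⟩)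
    · obtain ⟨k, hk, hpe⟩ := hP
      cases hpe
      exact Or.inr (Or.inr ⟨⟨k, hk, hin⟩, hy⟩)
  · rintro (⟨⟨k, hk, hin⟩, hy⟩ | ⟨⟨k, hk, hin⟩, hy⟩ | ⟨⟨k, hk, hin⟩, hy⟩)
    · exact ⟨(k, "Fire Station"), Or.inl (Or.inl ⟨k, hk, rfl⟩), hin, hy⟩
    · exact ⟨(k, "Ambulance"), Or.inl (Or.inr ⟨k, hk, rfl⟩), hin, hy⟩
    · exact ⟨(k, "Police"), Or.inr ⟨k, hk, rfl⟩, hin, hy⟩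

set_option maxHeartbeats 2000000 in
theorem dept_eq (text : String) :
    (classify_emergency text).1 = (classify_emergency_alt text).1 := by
  simp only [classify_emergency, classify_emergency_alt, PySem.Str.isIn_eq]
  have hmem := dept_mem text
  have hnd : (pvScan (PySem.Str.lower text).toList PySem.Set.empty 0).1.Nodup :=
    pvScan_fst_nodup _ _ _ List.nodup_nil
  rcases Bool.eq_false_or_eq_true (List.any ["fire", "smoke", "burn", "burning", "gas leak", "explosion"]
      (fun k => PySem.Chars.isIn k.toList (PySem.Str.lower text).toList)) with hf | hf <;>
    rcases Bool.eq_false_or_eq_true (List.any ["accident", "injury", "blood", "bleeding", "unconscious",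
        "faint", "breathing", "heart", "stroke"]
      (fun k => PySem.Chars.isIn k.toList (PySem.Str.lower text).toList)) with ha | ha <;>
    rcases Bool.eq_false_or_eq_true (List.any ["theft", "robbery", "attack", "fight", "threat", "weapon",
        "knife", "gun", "harassment"]
      (fun k => PySem.Chars.isIn k.toList (PySem.Str.lower text).toList)) with hp | hp <;>
    simp only [hf, ha, hp, Bool.false_eq_true, false_and, true_and,
      false_or, or_false] at hmem ⊢
  -- the eight boolean outcomes, in the order (fire, ambulance, police) = TTT, TTF, TFT, TFF, FTT, FTF, FFT, FFF
  · have hperm : ["Ambulance", "Fire Station", "Police"].Perm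
        (pvScan (PySem.Str.lower text).toList PySem.Set.empty 0).1 :=
      (List.perm_ext_iff_of_nodup (by decide) hnd).mpr (fun a => by rw [hmem a]; simp <;> tauto)
    rw [if_neg (List.ne_nil_of_mem (hperm.mem_iff.mp (List.mem_cons_self ..)))]
    rw [PySem.List.sorted_eq_of_perm_of_pairwise_lt _ _ _ hperm (by simp <;> decide)]
    exact PySem.List.sorted_eq_of_perm_of_pairwise_lt _ _ _ (by decide) (by simp <;> decide)
  · have hperm : ["Ambulance", "Fire Station"].Perm
        (pvScan (PySem.Str.lower text).toList PySem.Set.empty 0).1 :=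
      (List.perm_ext_iff_of_nodup (by decide) hnd).mpr (fun a => by rw [hmem a]; simp <;> tauto)
    rw [if_neg (List.ne_nil_of_mem (hperm.mem_iff.mp (List.mem_cons_self ..)))]
    rw [PySem.List.sorted_eq_of_perm_of_pairwise_lt _ _ _ hperm (by simp <;> decide)]
    exact PySem.List.sorted_eq_of_perm_of_pairwise_lt _ _ _ (by decide) (by simp <;> decide)
  · have hperm : ["Fire Station", "Police"].Perm
        (pvScan (PySem.Str.lower text).toList PySem.Set.empty 0).1 :=
      (List.perm_ext_iff_of_nodup (by decide) hnd).mpr (fun a => by rw [hmem a]; simp)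
    rw [if_neg (List.ne_nil_of_mem (hperm.mem_iff.mp (List.mem_cons_self ..)))]
    rw [PySem.List.sorted_eq_of_perm_of_pairwise_lt _ _ _ hperm (by simp <;> decide)]
    exact PySem.List.sorted_eq_of_perm_of_pairwise_lt _ _ _ (by decide) (by simp <;> decide)
  · have hperm : ["Fire Station"].Perm (pvScan (PySem.Str.lower text).toList PySem.Set.empty 0).1 :=
      (List.perm_ext_iff_of_nodup (by decide) hnd).mpr (fun a => by rw [hmem a]; simp)
    rw [if_neg (List.ne_nil_of_mem (hperm.mem_iff.mp (List.mem_cons_self ..)))]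
    rw [PySem.List.sorted_eq_of_perm_of_pairwise_lt _ _ _ hperm (by simp)]
    exact PySem.List.sorted_eq_of_perm_of_pairwise_lt _ _ _ (by decide) (by simp)
  · have hperm : ["Ambulance", "Police"].Perm
        (pvScan (PySem.Str.lower text).toList PySem.Set.empty 0).1 :=
      (List.perm_ext_iff_of_nodup (by decide) hnd).mpr (fun a => by rw [hmem a]; simp)
    rw [if_neg (List.ne_nil_of_mem (hperm.mem_iff.mp (List.mem_cons_self ..)))]
    rw [PySem.List.sorted_eq_of_perm_of_pairwise_lt _ _ _ hperm (by simp <;> decide)]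
    exact PySem.List.sorted_eq_of_perm_of_pairwise_lt _ _ _ (by decide) (by simp <;> decide)
  · have hperm : ["Ambulance"].Perm (pvScan (PySem.Str.lower text).toList PySem.Set.empty 0).1 :=
      (List.perm_ext_iff_of_nodup (by decide) hnd).mpr (fun a => by rw [hmem a]; simp)
    rw [if_neg (List.ne_nil_of_mem (hperm.mem_iff.mp (List.mem_cons_self ..)))]
    rw [PySem.List.sorted_eq_of_perm_of_pairwise_lt _ _ _ hperm (by simp)]
    exact PySem.List.sorted_eq_of_perm_of_pairwise_lt _ _ _ (by decide) (by simp)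
  · have hperm : ["Police"].Perm (pvScan (PySem.Str.lower text).toList PySem.Set.empty 0).1 :=
      (List.perm_ext_iff_of_nodup (by decide) hnd).mpr (fun a => by rw [hmem a]; simp)
    rw [if_neg (List.ne_nil_of_mem (hperm.mem_iff.mp (List.mem_cons_self ..)))]
    rw [PySem.List.sorted_eq_of_perm_of_pairwise_lt _ _ _ hperm (by simp)]
    exact PySem.List.sorted_eq_of_perm_of_pairwise_lt _ _ _ (by decide) (by simp)
  · -- no department keyword matched: the scanned set is empty, both sides fall back to Police
    have hS : (pvScan (PySem.Str.lower text).toList PySem.Set.empty 0).1 = [] :=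
      List.eq_nil_iff_forall_not_mem.mpr (fun y hy => (hmem y).mp hy)
    rw [hS]
    decide

-- ===== VERDICT =====
theorem classify_emergency_spec : Claim_equal_classify_emergency := by
  intro text _
  unfold Spec_classify_emergency
  exact Prod.ext (dept_eq text) (sev_eq text)
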